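-- pv_equiv track=rewrite | github.com/LoicGerber/ChessQS | chessFunctionsQS.py | generate_chessboard_pattern
-- ===== SOURCE A (Python) =====
-- def generate_chessboard_pattern(image_shape, tiles, tile_size, overlap):
--     white_tiles = set()
--     black_tiles = set()
--
--     step = tile_size - overlap
--     tiles_in_row = (image_shape[1] + step - 1) // step  # Calculate how many tiles fit in one row
--
--     for idx in range(len(tiles)):
--         row = idx // tiles_in_row
--         col = idx % tiles_in_row
--
--         if (row + col) % 2 == 0:
--             white_tiles.add(idx)
--         else:
--             black_tiles.add(idx)
--
--     return white_tiles, black_tiles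
-- ===== SOURCE B (Python) =====
-- def generate_chessboard_pattern(image_shape, tiles, tile_size, overlap):
--     white_tiles = set()
--     black_tiles = set()
--
--     step = tile_size - overlap
--     tiles_in_row = (image_shape[1] + step - 1) // step  # tiles per row
--     n = len(tiles)
--     n_rows = (n + tiles_in_row - 1) // tiles_in_row     # rows actually covered
--
--     for row in range(n_rows):
--         start = row * tiles_in_row
--         end = min(start + tiles_in_row, n)
--         # in an even row the white squares sit on even offsets, in an odd row on odd ones
--         white_tiles.update(range(start + row % 2, end, 2))
--         black_tiles.update(range(start + (row + 1) % 2, end, 2))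
--
--     return white_tiles, black_tiles
-- ===== Notes on version B (the rewrite author's own statement) =====
-- stated objective: alternative
-- what changed: Instead of computing row=idx//t and col=idx%t and testing (row+col) parity for every tile index, B loops over rows and emits the white/black indices of each row directly as strided ranges range(row_start + row%2, row_end, 2) / range(row_start + (row+1)%2, row_end, 2), clamping the last row to len(tiles); no per-index division or branch remains.
-- outside the precondition, e.g. on generate_chessboard_pattern((10, -5), [7], 3, 1): A returns ({0}, set()), B returns (set(), set()); on generate_chessboard_pattern((10, 0), [], 2, 1): A returns (set(), set()), B raises ZeroDivisionError
import Mathlib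
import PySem

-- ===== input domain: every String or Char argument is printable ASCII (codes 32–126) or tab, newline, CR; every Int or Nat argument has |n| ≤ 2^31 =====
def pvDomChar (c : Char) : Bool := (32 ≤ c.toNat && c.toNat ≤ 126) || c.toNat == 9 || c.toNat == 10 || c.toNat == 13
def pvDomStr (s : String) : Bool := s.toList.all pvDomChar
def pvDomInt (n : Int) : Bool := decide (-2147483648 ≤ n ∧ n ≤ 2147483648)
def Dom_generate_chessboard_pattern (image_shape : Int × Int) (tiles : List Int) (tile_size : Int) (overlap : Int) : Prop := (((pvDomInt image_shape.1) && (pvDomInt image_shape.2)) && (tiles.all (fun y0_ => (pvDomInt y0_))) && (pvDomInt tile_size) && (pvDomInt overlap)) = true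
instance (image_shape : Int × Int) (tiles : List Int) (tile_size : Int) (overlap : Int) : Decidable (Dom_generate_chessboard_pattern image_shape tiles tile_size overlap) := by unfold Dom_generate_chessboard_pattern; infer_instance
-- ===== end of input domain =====

-- B replaces A's per-index row/col computation and parity branch by a per-row loop that
-- emits the white and black indices of each row directly as strided ranges (alternative
-- decomposition, same cost).  Return-value equivalence only; neither mutates its arguments.

-- ===== PORT A =====
def generate_chessboard_pattern (image_shape : Int × Int) (tiles : List Int) (tile_size : Int) (overlap : Int) : List Int × List Int :=
  let step := tile_size - overlap
  let tiles_in_row := PySem.Int.floordiv (image_shape.2 + step - 1) step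
  (PySem.List.pyRange 0 (tiles.length : Int) 1).foldl
    (fun (acc : PySem.Set Int × PySem.Set Int) idx =>
      let row := PySem.Int.floordiv idx tiles_in_row
      let col := PySem.Int.mod idx tiles_in_row
      if PySem.Int.mod (row + col) 2 == 0 then (PySem.Set.add acc.1 idx, acc.2)
      else (acc.1, PySem.Set.add acc.2 idx))
    (PySem.Set.empty, PySem.Set.empty)

-- ===== PORT B =====
def generate_chessboard_pattern_alt (image_shape : Int × Int) (tiles : List Int) (tile_size : Int) (overlap : Int) : List Int × List Int :=
  let step := tile_size - overlap
  let tiles_in_row := PySem.Int.floordiv (image_shape.2 + step - 1) step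
  let n : Int := (tiles.length : Int)
  let n_rows := PySem.Int.floordiv (n + tiles_in_row - 1) tiles_in_row
  (PySem.List.pyRange 0 n_rows 1).foldl
    (fun (acc : PySem.Set Int × PySem.Set Int) row =>
      let start := row * tiles_in_row
      let e := min (start + tiles_in_row) n
      (PySem.Set.update acc.1 (PySem.List.pyRange (start + PySem.Int.mod row 2) e 2),
       PySem.Set.update acc.2 (PySem.List.pyRange (start + PySem.Int.mod (row + 1) 2) e 2)))
    (PySem.Set.empty, PySem.Set.empty)

-- ===== PRECONDITION & SPEC =====
-- Pre_ excludes the inputs where step = 0 or the computed tiles-per-row is ≤ 0: there A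
-- raises ZeroDivisionError (step = 0, or tiles_in_row = 0 with a nonempty tiles list), or
-- the geometry is meaningless (non-positive tiles-per-row) and A's partition is an artefact
-- of floor division producing negative row/column indices, where B's row loop naturally
-- covers no tiles (or raises ZeroDivisionError when tiles_in_row = 0 and tiles is empty).
def Pre_generate_chessboard_pattern (image_shape : Int × Int) (tiles : List Int) (tile_size : Int) (overlap : Int) : Prop :=
  tile_size - overlap ≠ 0 ∧
  0 < PySem.Int.floordiv (image_shape.2 + (tile_size - overlap) - 1) (tile_size - overlap)
instance (image_shape : Int × Int) (tiles : List Int) (tile_size : Int) (overlap : Int) : Decidable (Pre_generate_chessboard_pattern image_shape tiles tile_size overlap) := by unfold Pre_generate_chessboard_pattern; infer_instance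

def pvWitness_generate_chessboard_pattern : (Int × Int) × List Int × Int × Int := ((10, 5), [0, 1, 2, 3, 4, 5, 6], 3, 1)

def Spec_generate_chessboard_pattern (image_shape : Int × Int) (tiles : List Int) (tile_size : Int) (overlap : Int) (out : List Int × List Int) : Prop := out = generate_chessboard_pattern_alt image_shape tiles tile_size overlap
instance (image_shape : Int × Int) (tiles : List Int) (tile_size : Int) (overlap : Int) (out : List Int × List Int) : Decidable (Spec_generate_chessboard_pattern image_shape tiles tile_size overlap out) := by unfold Spec_generate_chessboard_pattern; infer_instance

-- ===== CLAIM (what is proved, stated in full; the proofs are below) =====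
def Claim_equal_generate_chessboard_pattern : Prop := ∀ (image_shape : Int × Int) (tiles : List Int) (tile_size : Int) (overlap : Int), Dom_generate_chessboard_pattern image_shape tiles tile_size overlap → Pre_generate_chessboard_pattern image_shape tiles tile_size overlap → Spec_generate_chessboard_pattern image_shape tiles tile_size overlap (generate_chessboard_pattern image_shape tiles tile_size overlap)

-- ===== LEMMAS AND PROOFS =====

-- pyRange with step 2 : nil and cons shapes
lemma pyRange_two_nil {a b : Int} (h : b ≤ a) : PySem.List.pyRange a b 2 = [] := by
  rw [PySem.List.pyRange_of_pos a b (by norm_num)]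
  simp [show ¬ a < b by omega]

lemma pyRange_two_cons {a b : Int} (h : a < b) :
    PySem.List.pyRange a b 2 = a :: PySem.List.pyRange (a + 2) b 2 := by
  rw [PySem.List.pyRange_of_pos a b (by norm_num), PySem.List.pyRange_of_pos (a+2) b (by norm_num)]
  by_cases h2 : a + 2 < b
  · have hcnt : ((b - a + 2 - 1) / 2).toNat = ((b - (a+2) + 2 - 1) / 2).toNat + 1 := by omega
    simp only [if_pos h, if_pos h2, hcnt, List.range_succ_eq_map, List.map_cons, List.map_map]
    refine List.cons_eq_cons.mpr ⟨by norm_num, ?_⟩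
    apply List.map_congr_left
    intro k _
    simp only [Function.comp_apply]
    push_cast
    ring
  · have hcnt : ((b - a + 2 - 1) / 2).toNat = 1 := by omega
    simp [h, h2, hcnt, List.range_succ]

lemma nodup_pyRange_two (a b : Int) : (PySem.List.pyRange a b 2).Nodup := by
  rw [PySem.List.pyRange_of_pos a b (by norm_num)]
  exact (List.nodup_range).map (fun x y hxy => by omega)

lemma mem_pyRange_two_bounds {a b x : Int} (hx : x ∈ PySem.List.pyRange a b 2) : a ≤ x ∧ x < b := by
  have := (PySem.List.mem_pyRange_iff_of_pos (by norm_num : (0:Int) < 2) x).mp hx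
  exact ⟨this.1, this.2.1⟩

-- step-1 range splits at any midpoint
lemma pyRange_split {a b c : Int} (hab : a ≤ b) (hbc : b ≤ c) :
    PySem.List.pyRange a c 1 = PySem.List.pyRange a b 1 ++ PySem.List.pyRange b c 1 := by
  rw [PySem.List.pyRange_one, PySem.List.pyRange_one, PySem.List.pyRange_one]
  have hn : (c - a).toNat = (b - a).toNat + (c - b).toNat := by omega
  rw [hn, List.range_add, List.map_append, List.map_map]
  congr 1
  apply List.map_congr_left
  intro k _
  simp only [Function.comp_apply]
  omega

-- congruence for flatMap over the members of a list
lemma flatMap_congr_mem {l : List Int} {f g : Int → List Int} (h : ∀ r ∈ l, f r = g r) :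
    l.flatMap f = l.flatMap g := by
  simp only [List.flatMap_def]
  rw [List.map_congr_left h]

-- filter commutes with flatMap
lemma filter_flatMap_comm (l : List Int) (f : Int → List Int) (p : Int → Bool) :
    (l.flatMap f).filter p = l.flatMap (fun x => (f x).filter p) := by
  induction l with
  | nil => simp
  | cons x xs ih => simp [List.flatMap_cons, List.filter_append, ih]

-- filtering a step-1 range by parity of (i + c) yields a stride-2 range
lemma filter_shift_even (c : Int) : ∀ (k : Nat) (a b : Int), (b - a).toNat = k →
    (PySem.List.pyRange a b 1).filter (fun i => PySem.Int.mod (i + c) 2 == 0)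
      = PySem.List.pyRange (a + PySem.Int.mod (a + c) 2) b 2 := by
  intro k
  induction k with
  | zero =>
    intro a b h
    have h0 : (0:Int) ≤ PySem.Int.mod (a + c) 2 := PySem.Int.mod_nonneg _ (by norm_num)
    rw [pyRange_two_nil (show b ≤ a + PySem.Int.mod (a + c) 2 by omega)]
    rw [PySem.List.pyRange_one]
    simp [show (b - a).toNat = 0 from h]
  | succ k ih =>
    intro a b h
    have hab : a < b := by omega
    have hmm : PySem.Int.mod (a + c) 2 = (a + c) % 2 := PySem.Int.mod_eq_emod_of_pos (by norm_num)
    have hmm1 : PySem.Int.mod (a + 1 + c) 2 = (a + 1 + c) % 2 := PySem.Int.mod_eq_emod_of_pos (by norm_num)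
    have hrec := ih (a + 1) b (by omega)
    rw [PySem.List.pyRange_one_cons hab, List.filter_cons]
    by_cases h0 : (a + c) % 2 = 0
    · have hcond : (PySem.Int.mod (a + c) 2 == 0) = true := by rw [hmm]; simp [h0]
      have e1 : a + 1 + PySem.Int.mod (a + 1 + c) 2 = a + 2 := by rw [hmm1]; omega
      have e2 : a + PySem.Int.mod (a + c) 2 = a := by rw [hmm]; omega
      simp only [hcond, if_true]
      rw [hrec, e1, e2, pyRange_two_cons hab]
    · have hcond : (PySem.Int.mod (a + c) 2 == 0) = false := by rw [hmm]; simp [h0]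
      have e1 : a + 1 + PySem.Int.mod (a + 1 + c) 2 = a + 1 := by rw [hmm1]; omega
      have e2 : a + PySem.Int.mod (a + c) 2 = a + 1 := by rw [hmm]; omega
      simp only [hcond, Bool.false_eq_true, if_false]
      rw [hrec, e1, e2]

-- decomposition of [0, n) into consecutive rows of width t (last row clamped)
lemma decomp (t : Int) (ht : 0 < t) : ∀ (k : Nat) (n : Int), 0 ≤ n →
    PySem.Int.floordiv (n + t - 1) t = (k : Int) →
    PySem.List.pyRange 0 n 1
      = (PySem.List.pyRange 0 (k : Int) 1).flatMap
          (fun r => PySem.List.pyRange (r * t) (min (r * t + t) n) 1) := by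
  intro k
  induction k with
  | zero =>
    intro n hn hc
    rw [PySem.Int.floordiv_eq_iff_of_pos ht] at hc
    have hn0 : n = 0 := by push_cast at hc; omega
    subst hn0
    simp [PySem.List.pyRange_one]
  | succ k ih =>
    intro n hn hc
    rw [PySem.Int.floordiv_eq_iff_of_pos ht] at hc
    have hlow : (k : Int) * t < n := by push_cast at hc ⊢; nlinarith [hc.1]
    have hhigh : n ≤ ((k : Int) + 1) * t := by push_cast at hc ⊢; nlinarith [hc.2]
    have hn' : (0:Int) ≤ (k : Int) * t := by positivity
    have hck : PySem.Int.floordiv ((k : Int) * t + t - 1) t = (k : Int) := by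
      rw [PySem.Int.floordiv_eq_iff_of_pos ht]
      constructor <;> nlinarith
    have hrec := ih ((k : Int) * t) hn' hck
    have hmain : PySem.List.pyRange 0 ((k : Int) * t) 1
        = (PySem.List.pyRange 0 (k : Int) 1).flatMap
            (fun r => PySem.List.pyRange (r * t) (min (r * t + t) n) 1) := by
      rw [hrec]
      apply flatMap_congr_mem
      intro r hr
      obtain ⟨hr0, hrk⟩ := PySem.List.mem_pyRange_one.mp hr
      have hrt : r * t + t ≤ (k : Int) * t := by nlinarith
      congr 1
      omega
    have hsucc : ((k + 1 : Nat) : Int) = (k : Int) + 1 := by push_cast; ring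
    rw [hsucc, PySem.List.pyRange_one_succ_right (by positivity : (0:Int) ≤ (k:Int)),
        List.flatMap_append, pyRange_split hn' (le_of_lt hlow), hmain]
    congr 1
    simp only [List.flatMap_cons, List.flatMap_nil, List.append_nil]
    congr 1
    have hfin : n ≤ (k:Int) * t + t := by nlinarith
    omega

-- A's fold with per-element Set.add, over a duplicate-free list, is filter/filter-not
lemma foldA (p : Int → Bool) : ∀ (xs w b : List Int), xs.Nodup →
    (∀ x ∈ xs, x ∉ w) → (∀ x ∈ xs, x ∉ b) →
    xs.foldl (fun (acc : PySem.Set Int × PySem.Set Int) i =>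
        if p i then (PySem.Set.add acc.1 i, acc.2) else (acc.1, PySem.Set.add acc.2 i)) (w, b)
      = (w ++ xs.filter p, b ++ xs.filter (fun i => !(p i))) := by
  intro xs
  induction xs with
  | nil => intro w b _ _ _; simp
  | cons x xs ih =>
    intro w b hnd hw hb
    have hxw : x ∉ w := hw x (by simp)
    have hxb : x ∉ b := hb x (by simp)
    simp only [List.foldl_cons, List.filter_cons]
    by_cases hp : p x
    · simp only [hp, if_true, Bool.not_true, Bool.false_eq_true, if_false]
      rw [PySem.Set.add_of_not_mem hxw]
      rw [ih (w ++ [x]) b (List.Nodup.of_cons hnd)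
            (fun y hy => by
              simp only [List.mem_append, List.mem_singleton, not_or]
              refine ⟨hw y (by simp [hy]), ?_⟩
              rintro rfl
              exact (List.nodup_cons.mp hnd).1 hy)
            (fun y hy => hb y (by simp [hy]))]
      simp
    · simp only [hp, Bool.false_eq_true, if_false, Bool.not_false, if_true]
      rw [PySem.Set.add_of_not_mem hxb]
      rw [ih w (b ++ [x]) (List.Nodup.of_cons hnd)
            (fun y hy => hw y (by simp [hy]))
            (fun y hy => by
              simp only [List.mem_append, List.mem_singleton, not_or]
              refine ⟨hb y (by simp [hy]), ?_⟩
              rintro rfl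
              exact (List.nodup_cons.mp hnd).1 hy)]
      simp

-- Set.update by a fresh duplicate-free list is append
lemma update_fresh : ∀ (l : List Int) (s : PySem.Set Int), l.Nodup → (∀ x ∈ l, x ∉ s) →
    PySem.Set.update s l = s ++ l := by
  intro l
  induction l with
  | nil => intro s _ _; simp [PySem.Set.update]
  | cons x xs ih =>
    intro s hnd hf
    have hstep : PySem.Set.update s (x :: xs) = PySem.Set.update (PySem.Set.add s x) xs := rfl
    rw [hstep, PySem.Set.add_of_not_mem (hf x (by simp))]
    rw [ih (s ++ [x]) (List.Nodup.of_cons hnd)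
          (fun y hy => by
            simp only [List.mem_append, List.mem_singleton, not_or]
            refine ⟨hf y (by simp [hy]), ?_⟩
            rintro rfl
            exact (List.nodup_cons.mp hnd).1 hy)]
    simp

-- B's row fold, with the invariant that everything emitted so far lies below the next row
lemma foldB (t n : Int) (ht : 0 < t) : ∀ (k : Nat) (r0 : Int) (w b : List Int),
    (∀ x ∈ w, x < r0 * t) → (∀ x ∈ b, x < r0 * t) →
    (PySem.List.pyRange r0 (r0 + (k : Int)) 1).foldl
      (fun (acc : PySem.Set Int × PySem.Set Int) r =>
        (PySem.Set.update acc.1 (PySem.List.pyRange (r * t + PySem.Int.mod r 2) (min (r * t + t) n) 2),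
         PySem.Set.update acc.2 (PySem.List.pyRange (r * t + PySem.Int.mod (r + 1) 2) (min (r * t + t) n) 2)))
      (w, b)
    = (w ++ (PySem.List.pyRange r0 (r0 + (k : Int)) 1).flatMap
          (fun r => PySem.List.pyRange (r * t + PySem.Int.mod r 2) (min (r * t + t) n) 2),
       b ++ (PySem.List.pyRange r0 (r0 + (k : Int)) 1).flatMap
          (fun r => PySem.List.pyRange (r * t + PySem.Int.mod (r + 1) 2) (min (r * t + t) n) 2)) := by
  intro k
  induction k with
  | zero =>
    intro r0 w b _ _
    simp
  | succ k ih =>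
    intro r0 w b hw hb
    have hcons : PySem.List.pyRange r0 (r0 + ((k + 1 : Nat) : Int)) 1
        = r0 :: PySem.List.pyRange (r0 + 1) (r0 + 1 + (k : Int)) 1 := by
      have h1 : r0 < r0 + ((k + 1 : Nat) : Int) := by push_cast; omega
      rw [PySem.List.pyRange_one_cons h1]
      congr 1
      push_cast
      ring
    have hm0 : (0:Int) ≤ PySem.Int.mod r0 2 := PySem.Int.mod_nonneg _ (by norm_num)
    have hm1 : (0:Int) ≤ PySem.Int.mod (r0 + 1) 2 := PySem.Int.mod_nonneg _ (by norm_num)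
    have hupW : PySem.Set.update w (PySem.List.pyRange (r0 * t + PySem.Int.mod r0 2) (min (r0 * t + t) n) 2)
        = w ++ PySem.List.pyRange (r0 * t + PySem.Int.mod r0 2) (min (r0 * t + t) n) 2 :=
      update_fresh _ w (nodup_pyRange_two _ _)
        (fun x hx hxs => by
          have hb1 := (mem_pyRange_two_bounds hx).1
          have := hw x hxs
          omega)
    have hupB : PySem.Set.update b (PySem.List.pyRange (r0 * t + PySem.Int.mod (r0 + 1) 2) (min (r0 * t + t) n) 2)
        = b ++ PySem.List.pyRange (r0 * t + PySem.Int.mod (r0 + 1) 2) (min (r0 * t + t) n) 2 :=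
      update_fresh _ b (nodup_pyRange_two _ _)
        (fun x hx hxs => by
          have hb1 := (mem_pyRange_two_bounds hx).1
          have := hb x hxs
          omega)
    have hwin : ∀ x ∈ w ++ PySem.List.pyRange (r0 * t + PySem.Int.mod r0 2) (min (r0 * t + t) n) 2,
        x < (r0 + 1) * t := by
      intro x hx
      rcases List.mem_append.mp hx with hx | hx
      · have := hw x hx; nlinarith
      · have := (mem_pyRange_two_bounds hx).2
        have h2 : min (r0 * t + t) n ≤ r0 * t + t := min_le_left _ _
        nlinarith
    have hbin : ∀ x ∈ b ++ PySem.List.pyRange (r0 * t + PySem.Int.mod (r0 + 1) 2) (min (r0 * t + t) n) 2,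
        x < (r0 + 1) * t := by
      intro x hx
      rcases List.mem_append.mp hx with hx | hx
      · have := hb x hx; nlinarith
      · have := (mem_pyRange_two_bounds hx).2
        have h2 : min (r0 * t + t) n ≤ r0 * t + t := min_le_left _ _
        nlinarith
    rw [hcons]
    simp only [List.foldl_cons, List.flatMap_cons]
    rw [hupW, hupB, ih (r0 + 1) _ _ hwin hbin]
    simp [List.append_assoc]

-- within one row, A's parity test reduces to a stride-2 range (white squares)
lemma block_filter_white (t : Int) (ht : 0 < t) (r e : Int) (he : e ≤ r * t + t) :
    (PySem.List.pyRange (r * t) e 1).filter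
        (fun i => PySem.Int.mod (PySem.Int.floordiv i t + PySem.Int.mod i t) 2 == 0)
      = PySem.List.pyRange (r * t + PySem.Int.mod r 2) e 2 := by
  have hfc : ∀ i ∈ PySem.List.pyRange (r * t) e 1,
      (PySem.Int.mod (PySem.Int.floordiv i t + PySem.Int.mod i t) 2 == 0)
        = (PySem.Int.mod (i + (r - r * t)) 2 == 0) := by
    intro i hi
    obtain ⟨h1, h2⟩ := PySem.List.mem_pyRange_one.mp hi
    have hfd : PySem.Int.floordiv i t = r := by
      rw [PySem.Int.floordiv_eq_iff_of_pos ht]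
      constructor
      · exact h1
      · nlinarith
    have hmd : PySem.Int.mod i t = i - r * t := by
      have h3 := PySem.Int.floordiv_mul_add_mod i t
      rw [hfd] at h3
      omega
    rw [hfd, hmd]
    congr 1
    ring
  rw [List.filter_congr hfc,
      filter_shift_even (r - r * t) (e - r * t).toNat (r * t) e rfl,
      show r * t + (r - r * t) = r by ring]

lemma not_mod2 (x : Int) : (!(PySem.Int.mod x 2 == 0)) = (PySem.Int.mod (x + 1) 2 == 0) := by
  rw [PySem.Int.mod_eq_emod_of_pos (by norm_num : (0:Int) < 2),
      PySem.Int.mod_eq_emod_of_pos (by norm_num : (0:Int) < 2)]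
  rcases Int.emod_two_eq x with h | h
  · rw [h, show (x + 1) % 2 = 1 by omega]
    decide
  · rw [h, show (x + 1) % 2 = 0 by omega]
    decide

lemma block_filter_black (t : Int) (ht : 0 < t) (r e : Int) (he : e ≤ r * t + t) :
    (PySem.List.pyRange (r * t) e 1).filter
        (fun i => !(PySem.Int.mod (PySem.Int.floordiv i t + PySem.Int.mod i t) 2 == 0))
      = PySem.List.pyRange (r * t + PySem.Int.mod (r + 1) 2) e 2 := by
  have hfc : ∀ i ∈ PySem.List.pyRange (r * t) e 1,
      (!(PySem.Int.mod (PySem.Int.floordiv i t + PySem.Int.mod i t) 2 == 0))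
        = (PySem.Int.mod (i + (r - r * t + 1)) 2 == 0) := by
    intro i hi
    obtain ⟨h1, h2⟩ := PySem.List.mem_pyRange_one.mp hi
    have hfd : PySem.Int.floordiv i t = r := by
      rw [PySem.Int.floordiv_eq_iff_of_pos ht]
      constructor
      · exact h1
      · nlinarith
    have hmd : PySem.Int.mod i t = i - r * t := by
      have h3 := PySem.Int.floordiv_mul_add_mod i t
      rw [hfd] at h3
      omega
    rw [hfd, hmd, not_mod2]
    congr 1
    ring
  rw [List.filter_congr hfc,
      filter_shift_even (r - r * t + 1) (e - r * t).toNat (r * t) e rfl,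
      show r * t + (r - r * t + 1) = r + 1 by ring]

-- the two folds agree for any positive row width t and any 0 ≤ n
lemma main_eq (t n : Int) (ht : 0 < t) (hn : 0 ≤ n) :
    (PySem.List.pyRange 0 n 1).foldl
      (fun (acc : PySem.Set Int × PySem.Set Int) idx =>
        if PySem.Int.mod (PySem.Int.floordiv idx t + PySem.Int.mod idx t) 2 == 0
        then (PySem.Set.add acc.1 idx, acc.2) else (acc.1, PySem.Set.add acc.2 idx))
      (PySem.Set.empty, PySem.Set.empty)
    = (PySem.List.pyRange 0 (PySem.Int.floordiv (n + t - 1) t) 1).foldl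
      (fun (acc : PySem.Set Int × PySem.Set Int) r =>
        (PySem.Set.update acc.1 (PySem.List.pyRange (r * t + PySem.Int.mod r 2) (min (r * t + t) n) 2),
         PySem.Set.update acc.2 (PySem.List.pyRange (r * t + PySem.Int.mod (r + 1) 2) (min (r * t + t) n) 2)))
      (PySem.Set.empty, PySem.Set.empty) := by
  have hR : (0:Int) ≤ PySem.Int.floordiv (n + t - 1) t := by
    rw [PySem.Int.le_floordiv_iff_mul_le (by omega : (0:Int) < t)]
    omega
  set R := PySem.Int.floordiv (n + t - 1) t with hRdef
  have hk : R = ((R.toNat : Nat) : Int) := (Int.toNat_of_nonneg hR).symm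
  have hA := foldA
    (fun i => PySem.Int.mod (PySem.Int.floordiv i t + PySem.Int.mod i t) 2 == 0)
    (PySem.List.pyRange 0 n 1) PySem.Set.empty PySem.Set.empty
    (PySem.List.nodup_pyRange_one 0 n)
    (fun x _ hx => by simp [PySem.Set.empty] at hx)
    (fun x _ hx => by simp [PySem.Set.empty] at hx)
  beta_reduce at hA
  have hB := foldB t n ht R.toNat 0 PySem.Set.empty PySem.Set.empty
    (fun x hx => by simp [PySem.Set.empty] at hx)
    (fun x hx => by simp [PySem.Set.empty] at hx)
  rw [show (0:Int) + ((R.toNat : Nat) : Int) = R by omega] at hB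
  rw [hA, hB]
  have hdec := decomp t ht R.toNat n hn (by rw [← hRdef]; exact hk)
  rw [hk] at hdec ⊢
  refine Prod.ext ?_ ?_
  · show PySem.Set.empty ++ _ = PySem.Set.empty ++ _
    congr 1
    rw [hdec, filter_flatMap_comm]
    apply flatMap_congr_mem
    intro r _
    exact block_filter_white t ht r _ (min_le_left _ _)
  · show PySem.Set.empty ++ _ = PySem.Set.empty ++ _
    congr 1
    rw [hdec, filter_flatMap_comm]
    apply flatMap_congr_mem
    intro r _
    exact block_filter_black t ht r _ (min_le_left _ _)

-- ===== VERDICT (by name: the statement is the Claim_ definition above) =====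
theorem generate_chessboard_pattern_spec : Claim_equal_generate_chessboard_pattern := by
  intro image_shape tiles tile_size overlap _ hpre
  obtain ⟨hs, ht⟩ := hpre
  show generate_chessboard_pattern _ _ _ _ = generate_chessboard_pattern_alt _ _ _ _
  unfold generate_chessboard_pattern generate_chessboard_pattern_alt
  exact main_eq _ (tiles.length : Int) ht (Int.natCast_nonneg _)
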